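-- pv_equiv track=rewrite | github.com/fvadzim/implementations | spoon.py | get_command_list
-- ===== SOURCE A (Python) =====
-- def get_command_list(code):
--     possible_commands = [
--         "1", "000", "010", "011",
--         "00100", "0011", "001010", "0010110"]
--
--     if any(symbol not in ('0', '1', '\n', ' ') for symbol in code):
--         raise SyntaxError(
--             "Spoon code should consist of binary symbols only")
--     spoon_commands = []
--     spoon_sub_code = code.split()
--     for sub_code in spoon_sub_code:
--         start = 0
--         while start < len(sub_code):
--             is_command_found = False
--             for possible_command in possible_commands:
--                 if sub_code[start: start + len(possible_command)] \
--                         == possible_command: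
--                     spoon_commands += possible_command
--                     start += len(possible_command)
--                     is_command_found = True
--             if not is_command_found:
--                 raise SyntaxError("Unexpected commands found")
--     return spoon_commands
-- ===== SOURCE B (Python) =====
-- def get_command_list(code):
--     if any(symbol not in ('0', '1', '\n', ' ') for symbol in code):
--         raise SyntaxError(
--             "Spoon code should consist of binary symbols only")
--     commands = [
--         "1", "000", "010", "011",
--         "00100", "0011", "001010", "0010110"]
--     result = []
--     for token in code.split():
--         # ok[j - i] says whether token[j:] decomposes into commands;
--         # built right-to-left, so ok[0] is the answer for token[i:].
--         ok = [True]
--         for i in range(len(token) - 1, -1, -1):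
--             ok = [any(token[i:i + len(c)] == c and ok[len(c) - 1]
--                       for c in commands)] + ok
--         if not ok[0]:
--             raise SyntaxError("Unexpected commands found")
--         result.extend(token)
--     return result
-- ===== Notes on version B (the rewrite author's own statement) =====
-- stated objective: alternative
-- what changed: A repeatedly sweeps the fixed command list over each token, appending every command that happens to match as the position advances inside one sweep; B instead builds, per token, a right-to-left decomposability table (ok[i] = token[i:] is a concatenation of commands) and emits the token's characters when ok[0] holds, keeping both SyntaxError guards and messages.
import Mathlib
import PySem

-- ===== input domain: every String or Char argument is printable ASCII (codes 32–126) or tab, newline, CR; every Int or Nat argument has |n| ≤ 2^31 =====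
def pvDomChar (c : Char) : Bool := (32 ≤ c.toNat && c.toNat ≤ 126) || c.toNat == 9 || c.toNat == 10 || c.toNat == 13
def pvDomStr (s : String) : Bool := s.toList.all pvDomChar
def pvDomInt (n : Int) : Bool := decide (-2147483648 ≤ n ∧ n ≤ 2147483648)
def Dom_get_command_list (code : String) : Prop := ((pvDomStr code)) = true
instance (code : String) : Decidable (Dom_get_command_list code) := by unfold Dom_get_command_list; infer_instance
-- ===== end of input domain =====

-- B replaces A's multi-match greedy pass parser by a per-token backward DP (decomposability table);
-- objective: alternative algorithm of similar cost. Both error paths of the Pythons raise SyntaxError;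
-- those inputs are excluded by Pre_ and the ports return [] on them.

-- the Spoon command set (shared constant of both programs)
def spoonCmds : List (List Char) :=
  [['1'], ['0','0','0'], ['0','1','0'], ['0','1','1'],
   ['0','0','1','0','0'], ['0','0','1','1'],
   ['0','0','1','0','1','0'], ['0','0','1','0','1','1','0']]

-- `spoon_commands += possible_command` / `result.extend(token)`: one 1-char string per character
def pvCharsOf (cs : List Char) : List String := cs.map (fun ch => String.mk [ch])

-- ===== PORT A =====
-- inner `for possible_command in possible_commands` loop; state = (spoon_commands, start, is_command_found)
-- sub_code[start:start+len(c)] == c with start ≥ 0 is exactly (drop start).take (len c) = c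
def pvPassStep (t : List Char) (s : List String × Nat × Bool) (c : List Char) : List String × Nat × Bool :=
  if (t.drop s.2.1).take c.length = c then
    (s.1 ++ pvCharsOf c, s.2.1 + c.length, true)
  else s

-- the `while start < len(sub_code)` loop; fuel t.length + 1 suffices because every pass that
-- continues strictly increases start (proved below); none = the SyntaxError path (outside Pre_)
def pvLoopA (t : List Char) : Nat → Nat → List String → Option (List String)
  | 0, _, _ => none
  | fuel+1, start, acc =>
    if start < t.length then
      let r := spoonCmds.foldl (pvPassStep t) (acc, start, false)
      if r.2.2 then pvLoopA t fuel r.2.1 r.1 else none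
    else some acc

def get_command_list (code : String) : List String :=
  -- `raise SyntaxError(...)` paths are excluded by Pre_; the port returns [] there
  if code.toList.any (fun ch => !(ch == '0' || ch == '1' || ch == '\n' || ch == ' ')) then []
  else
    ((PySem.Chars.split₀ code.toList).foldl
      (fun (acc? : Option (List String)) tok =>
        acc?.bind (fun acc => pvLoopA tok (tok.length + 1) 0 acc))
      (some [])).getD []

-- ===== PORT B =====
-- one step of the backward DP: prepend ok[i] computed from the already-built suffix table;
-- Python's ok[len(c)-1] is reached only under the short-circuiting slice test, hence in range (getD exact)
def pvOkStep (t : List Char) (ok : List Bool) (i : Nat) : List Bool :=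
  (spoonCmds.any (fun c => decide ((t.drop i).take c.length = c) && ok.getD (c.length - 1) false)) :: ok

-- `for i in range(len(token)-1, -1, -1)` = reversed range(len(token)); answer is ok[0]
def pvTokenOk (t : List Char) : Bool :=
  (((List.range t.length).reverse).foldl (pvOkStep t) [true]).getD 0 false

def get_command_list_alt (code : String) : List String :=
  if code.toList.any (fun ch => !(ch == '0' || ch == '1' || ch == '\n' || ch == ' ')) then []
  else
    ((PySem.Chars.split₀ code.toList).foldl
      (fun (acc? : Option (List String)) tok =>
        acc?.bind (fun acc => if pvTokenOk tok then some (acc ++ pvCharsOf tok) else none))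
      (some [])).getD []

-- ===== PRECONDITION & SPEC =====
-- membership in the regular language (1|000|010|011|00100|0011|001010|0010110)+ ∪ {ε},
-- by bounded recursion (the bound y.length only makes the recursion structural; each step drops ≥ 1 char)
def decompN : Nat → List Char → Bool
  | 0, y => y.isEmpty
  | n+1, y =>
    if y.isEmpty then true
    else
      (List.isPrefixOf ['1'] y && decompN n (y.drop 1)) ||
      (List.isPrefixOf ['0','0','0'] y && decompN n (y.drop 3)) ||
      (List.isPrefixOf ['0','1','0'] y && decompN n (y.drop 3)) ||
      (List.isPrefixOf ['0','1','1'] y && decompN n (y.drop 3)) ||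
      (List.isPrefixOf ['0','0','1','0','0'] y && decompN n (y.drop 5)) ||
      (List.isPrefixOf ['0','0','1','1'] y && decompN n (y.drop 4)) ||
      (List.isPrefixOf ['0','0','1','0','1','0'] y && decompN n (y.drop 6)) ||
      (List.isPrefixOf ['0','0','1','0','1','1','0'] y && decompN n (y.drop 7))

def decomp (y : List Char) : Bool := decompN y.length y

-- Pre_ = exactly the inputs where A returns: every character is one of the four A accepts
-- (zero, one, newline, space), and every whitespace-separated token lies in the command
-- language (else A raises SyntaxError)
def Pre_get_command_list (code : String) : Prop :=
  (code.toList.all (fun ch => ch == '0' || ch == '1' || ch == '\n' || ch == ' ')) = true ∧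
  ((PySem.Chars.split₀ code.toList).all (fun tok => decomp tok)) = true

instance (code : String) : Decidable (Pre_get_command_list code) := by
  unfold Pre_get_command_list; infer_instance

def pvWitness_get_command_list : String := "0011 1\n000010"

def Spec_get_command_list (code : String) (out : List String) : Prop := out = get_command_list_alt code
instance (code : String) (out : List String) : Decidable (Spec_get_command_list code out) := by unfold Spec_get_command_list; infer_instance

-- ===== CLAIM (what is proved, stated in full; the proofs are below) =====
def Claim_equal_get_command_list : Prop := ∀ (code : String), Dom_get_command_list code → Pre_get_command_list code → Spec_get_command_list code (get_command_list code)

-- ===== LEMMAS AND PROOFS =====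

-- no command is a proper prefix of another
theorem pv_cmds_prefix_incomp :
    ∀ c₁ ∈ spoonCmds, ∀ c₂ ∈ spoonCmds, c₁.isPrefixOf c₂ = true → c₁ = c₂ := by
  decide

theorem pv_cmds_len : ∀ c ∈ spoonCmds, 0 < c.length ∧ c.length ≤ 7 := by decide

-- at most one command can match at any position
theorem pv_cmd_unique {c₁ c₂ : List Char} {y : List Char}
    (h₁ : c₁ ∈ spoonCmds) (h₂ : c₂ ∈ spoonCmds) (p₁ : c₁ <+: y) (p₂ : c₂ <+: y) : c₁ = c₂ := by
  rcases List.prefix_or_prefix_of_prefix p₁ p₂ with h | h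
  · exact pv_cmds_prefix_incomp c₁ h₁ c₂ h₂ (List.isPrefixOf_iff_prefix.2 h)
  · exact (pv_cmds_prefix_incomp c₂ h₂ c₁ h₁ (List.isPrefixOf_iff_prefix.2 h)).symm

theorem pv_isPrefixOf_take (c y : List Char) : c.isPrefixOf y = decide (y.take c.length = c) := by
  by_cases h : c <+: y
  · simp [List.isPrefixOf_iff_prefix.2 h, (List.prefix_iff_eq_take.1 h).symm]
  · have : ¬ y.take c.length = c := fun he => h (List.prefix_iff_eq_take.2 he.symm)
    simp [this]
    exact Bool.eq_false_iff.2 (fun he => h (List.isPrefixOf_iff_prefix.1 he))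

theorem pv_decompN_congr : ∀ n m (y : List Char), y.length ≤ n → y.length ≤ m →
    decompN n y = decompN m y := by
  intro n
  induction n with
  | zero =>
    intro m y hn _
    have : y = [] := List.eq_nil_of_length_eq_zero (by omega)
    subst this
    cases m <;> simp [decompN]
  | succ n ih =>
    intro m y hn hm
    cases y with
    | nil => cases m <;> simp [decompN]
    | cons a r =>
      cases m with
      | zero => simp at hm
      | succ m' =>
        simp only [List.length_cons] at hn hm
        simp only [decompN, List.isEmpty_cons, Bool.false_eq_true, if_false]
        have e1 := ih m' ((a :: r).drop 1) (by simp; omega) (by simp; omega)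
        have e2 := ih m' ((a :: r).drop 3) (by simp; omega) (by simp; omega)
        have e3 := ih m' ((a :: r).drop 4) (by simp; omega) (by simp; omega)
        have e4 := ih m' ((a :: r).drop 5) (by simp; omega) (by simp; omega)
        have e5 := ih m' ((a :: r).drop 6) (by simp; omega) (by simp; omega)
        have e6 := ih m' ((a :: r).drop 7) (by simp; omega) (by simp; omega)
        rw [e1, e2, e3, e4, e5, e6]

theorem pv_decomp_nil : decomp [] = true := rfl

theorem pv_decomp_eq_any (y : List Char) (h : y ≠ []) :
    decomp y = spoonCmds.any (fun c => decide (y.take c.length = c) && decomp (y.drop c.length)) := by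
  cases y with
  | nil => exact absurd rfl h
  | cons a r =>
    show decompN (r.length + 1) (a :: r) = _
    simp only [decompN, List.isEmpty_cons, Bool.false_eq_true, if_false]
    have hc : ∀ k : Nat, 1 ≤ k →
        decompN r.length ((a :: r).drop k) = decomp ((a :: r).drop k) := by
      intro k hk
      exact pv_decompN_congr r.length ((a :: r).drop k).length ((a :: r).drop k)
        (by simp; omega) le_rfl
    rw [hc 1 (by omega), hc 3 (by omega), hc 5 (by omega), hc 4 (by omega),
        hc 6 (by omega), hc 7 (by omega)]
    simp only [spoonCmds, List.any_cons, List.any_nil, pv_isPrefixOf_take]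
    simp
    ac_rfl

theorem pv_decomp_exists {y : List Char} (h : y ≠ []) (hd : decomp y = true) :
    ∃ c ∈ spoonCmds, c <+: y ∧ decomp (y.drop c.length) = true := by
  rw [pv_decomp_eq_any y h] at hd
  rcases List.any_eq_true.1 hd with ⟨c, hc, hcc⟩
  simp only [Bool.and_eq_true, decide_eq_true_eq] at hcc
  exact ⟨c, hc, List.prefix_iff_eq_take.2 hcc.1.symm, hcc.2⟩

theorem pv_decomp_drop {y c : List Char} (hc : c ∈ spoonCmds) (hp : c <+: y)
    (hd : decomp y = true) : decomp (y.drop c.length) = true := by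
  have hne : y ≠ [] := by
    intro he; subst he
    have := (pv_cmds_len c hc).1
    have := List.eq_nil_of_prefix_nil hp
    simp [this] at *
  rcases pv_decomp_exists hne hd with ⟨c', hc', hp', hd'⟩
  rwa [← pv_cmd_unique hc hc' hp hp'] at hd'

theorem pv_any_congr {α : Type} (l : List α) (f g : α → Bool)
    (h : ∀ x ∈ l, f x = g x) : l.any f = l.any g := by
  induction l with
  | nil => simp
  | cons a l ih =>
    rw [List.any_cons, List.any_cons, h a List.mem_cons_self,
        ih (fun x hx => h x (List.mem_cons_of_mem a hx))]

-- ===== B side: the DP table is pointwise decomp =====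
theorem pv_okFold (t : List Char) : ∀ m, m ≤ t.length →
    (((List.range' (t.length - m) m).reverse).foldl (pvOkStep t) [true])
      = (List.range' (t.length - m) (m + 1)).map (fun j => decomp (t.drop j)) := by
  intro m
  induction m with
  | zero =>
    intro _
    simp [List.range'_one, List.drop_length, pv_decomp_nil]
  | succ m ih =>
    intro hm
    set k := t.length - (m + 1) with hk
    have hk1 : t.length - m = k + 1 := by omega
    have hrange : List.range' k (m + 1) = k :: List.range' (k + 1) m := by
      rw [List.range'_succ]
    have ihh := ih (by omega)
    rw [hk1] at ihh
    rw [hrange, List.reverse_cons, List.foldl_append, ihh]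
    have hrange2 : List.range' k (m + 1 + 1) = k :: List.range' (k + 1) (m + 1) := by
      rw [List.range'_succ]
    rw [hrange2, List.map_cons]
    simp only [List.foldl_cons, List.foldl_nil, pvOkStep]
    congr 1
    -- head entry: ok[k] = decomp (t.drop k)
    have hne : t.drop k ≠ [] := by
      intro he
      have := congrArg List.length he
      simp at this; omega
    rw [pv_decomp_eq_any (t.drop k) hne]
    apply pv_any_congr
    intro c hc
    have hcl := pv_cmds_len c hc
    by_cases h : (t.drop k).take c.length = c
    · have hlen : c.length ≤ m + 1 := by
        have := congrArg List.length h
        simp [List.length_take, List.length_drop] at this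
        omega
      have hidx : c.length - 1 < m + 1 := by omega
      have hget : ((List.range' (k + 1) (m + 1)).map (fun j => decomp (t.drop j))).getD (c.length - 1) false
          = decomp (t.drop (k + 1 + (c.length - 1))) := by
        rw [List.getD_eq_getElem?_getD, List.getElem?_map,
            List.getElem?_eq_getElem (by simpa using hidx)]
        simp [List.getElem_range']
      have hidx2 : k + 1 + (c.length - 1) = k + c.length := by omega
      rw [hget, hidx2, h]
      have : (t.drop k).drop c.length = t.drop (k + c.length) := by
        rw [List.drop_drop]
      rw [this]
    · simp [h]

theorem pv_tokenOk_eq (t : List Char) : pvTokenOk t = decomp t := by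
  unfold pvTokenOk
  rw [List.range_eq_range']
  have := pv_okFold t t.length le_rfl
  rw [Nat.sub_self] at this
  rw [this, List.range'_succ, List.map_cons]
  simp

-- ===== A side: one pass invariant =====
theorem pv_pass_inv (t : List Char) :
    ∀ (cs : List (List Char)), (∀ c ∈ cs, c ∈ spoonCmds) →
    ∀ acc st fd, st ≤ t.length → decomp (t.drop st) = true →
    (cs.foldl (pvPassStep t) (acc, st, fd)).1
      = acc ++ pvCharsOf ((t.drop st).take ((cs.foldl (pvPassStep t) (acc, st, fd)).2.1 - st)) ∧
    st ≤ (cs.foldl (pvPassStep t) (acc, st, fd)).2.1 ∧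
    (cs.foldl (pvPassStep t) (acc, st, fd)).2.1 ≤ t.length ∧
    decomp (t.drop (cs.foldl (pvPassStep t) (acc, st, fd)).2.1) = true ∧
    (cs.foldl (pvPassStep t) (acc, st, fd)).2.2
      = (fd || decide (st < (cs.foldl (pvPassStep t) (acc, st, fd)).2.1)) ∧
    ((∃ c ∈ cs, (t.drop st).take c.length = c) → st < (cs.foldl (pvPassStep t) (acc, st, fd)).2.1) := by
  intro cs
  induction cs with
  | nil =>
    intro _ acc st fd hst hd
    simp [pvCharsOf, hst, hd]
  | cons c cs ih =>
    intro hmem acc st fd hst hd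
    have hc : c ∈ spoonCmds := hmem c (List.mem_cons_self)
    have hclen := pv_cmds_len c hc
    simp only [List.foldl_cons]
    by_cases hm : (t.drop st).take c.length = c
    · -- c matches at st
      have hstep : pvPassStep t (acc, st, fd) c = (acc ++ pvCharsOf c, st + c.length, true) := by
        simp [pvPassStep, hm]
      have hpre : c <+: t.drop st := List.prefix_iff_eq_take.2 hm.symm
      have hlen : c.length ≤ t.length - st := by
        have := congrArg List.length hm
        simp [List.length_take, List.length_drop] at this
        omega
      have hst' : st + c.length ≤ t.length := by omega
      have hdd : (t.drop st).drop c.length = t.drop (st + c.length) := by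
        rw [List.drop_drop]
      have hd' : decomp (t.drop (st + c.length)) = true := by
        rw [← hdd]; exact pv_decomp_drop hc hpre hd
      simp only [hstep]
      obtain ⟨i1, i2, i3, i4, i5, _⟩ :=
        ih (fun x hx => hmem x (List.mem_cons_of_mem c hx)) (acc ++ pvCharsOf c)
          (st + c.length) true hst' hd'
      set r := cs.foldl (pvPassStep t) (acc ++ pvCharsOf c, st + c.length, true) with hr
      have hsplit : t.drop st = c ++ t.drop (st + c.length) := by
        conv_lhs => rw [← List.take_append_drop c.length (t.drop st)]
        rw [hm, hdd]
      refine ⟨?_, by omega, i3, i4, ?_, fun _ => by omega⟩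
      · rw [i1, hsplit]
        have htk : (c ++ t.drop (st + c.length)).take (r.2.1 - st)
            = c ++ (t.drop (st + c.length)).take (r.2.1 - (st + c.length)) := by
          have : r.2.1 - st = c.length + (r.2.1 - (st + c.length)) := by omega
          rw [this]
          simp [List.take_append]
        rw [htk]
        simp [pvCharsOf]
      · rw [i5]
        have h1 : st < r.2.1 := by omega
        simp [h1]
    · -- c does not match at st
      have hstep : pvPassStep t (acc, st, fd) c = (acc, st, fd) := by
        simp [pvPassStep, hm]
      simp only [hstep]
      obtain ⟨i1, i2, i3, i4, i5, i6⟩ :=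
        ih (fun x hx => hmem x (List.mem_cons_of_mem c hx)) acc st fd hst hd
      refine ⟨i1, i2, i3, i4, i5, ?_⟩
      rintro ⟨c', hc', hcm⟩
      rcases List.mem_cons.1 hc' with rfl | hc'
      · exact absurd hcm hm
      · exact i6 ⟨c', hc', hcm⟩

theorem pv_loopA_eq (t : List Char) : ∀ fuel start acc, t.length - start < fuel →
    start ≤ t.length → decomp (t.drop start) = true →
    pvLoopA t fuel start acc = some (acc ++ pvCharsOf (t.drop start)) := by
  intro fuel
  induction fuel with
  | zero => intro start acc h _ _; exact absurd h (by omega)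
  | succ fuel ih =>
    intro start acc hfuel hst hd
    rw [pvLoopA]
    by_cases hlt : start < t.length
    · rw [if_pos hlt]
      obtain ⟨i1, i2, i3, i4, i5, i6⟩ :=
        pv_pass_inv t spoonCmds (fun _ hx => hx) acc start false hst hd
      show (if (spoonCmds.foldl (pvPassStep t) (acc, start, false)).2.2 = true then
          pvLoopA t fuel (spoonCmds.foldl (pvPassStep t) (acc, start, false)).2.1
            (spoonCmds.foldl (pvPassStep t) (acc, start, false)).1
        else none) = _
      generalize hg : spoonCmds.foldl (pvPassStep t) (acc, start, false) = r
      rw [hg] at i1 i2 i3 i4 i5 i6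
      have hne : t.drop start ≠ [] := by
        intro he
        have := congrArg List.length he
        simp at this; omega
      rcases pv_decomp_exists hne hd with ⟨c, hc, hp, _⟩
      have hfound : start < r.2.1 :=
        i6 ⟨c, hc, (List.prefix_iff_eq_take.1 hp).symm⟩
      have hflag : r.2.2 = true := by rw [i5]; simp [hfound]
      rw [hflag, if_pos rfl]
      rw [ih r.2.1 r.1 (by omega) i3 i4, i1]
      have hsplit : (t.drop start).take (r.2.1 - start) ++ t.drop r.2.1 = t.drop start := by
        have hdd2 : t.drop r.2.1 = (t.drop start).drop (r.2.1 - start) := by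
          rw [List.drop_drop]
          exact congrArg (fun k => List.drop k t) (by omega)
        rw [hdd2, List.take_append_drop]
      conv_rhs => rw [← hsplit]
      simp only [pvCharsOf, List.map_append, List.append_assoc]
    · have hse : start = t.length := by omega
      subst hse
      rw [if_neg (by omega)]
      simp [List.drop_length, pvCharsOf]

-- ===== top level =====
theorem pv_foldA (toks : List (List Char)) :
    (∀ tok ∈ toks, decomp tok = true) → ∀ acc,
    toks.foldl (fun (acc? : Option (List String)) tok =>
        acc?.bind (fun acc => pvLoopA tok (tok.length + 1) 0 acc)) (some acc)
      = some (acc ++ (toks.map pvCharsOf).flatten) := by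
  induction toks with
  | nil => intro _ acc; simp
  | cons tok toks ih =>
    intro h acc
    simp only [List.foldl_cons, Option.bind_some]
    rw [pv_loopA_eq tok (tok.length + 1) 0 acc (by omega) (by omega)
          (by simpa using h tok List.mem_cons_self)]
    rw [ih (fun x hx => h x (List.mem_cons_of_mem tok hx))]
    simp

theorem pv_foldB (toks : List (List Char)) :
    (∀ tok ∈ toks, decomp tok = true) → ∀ acc,
    toks.foldl (fun (acc? : Option (List String)) tok =>
        acc?.bind (fun acc => if pvTokenOk tok then some (acc ++ pvCharsOf tok) else none)) (some acc)
      = some (acc ++ (toks.map pvCharsOf).flatten) := by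
  induction toks with
  | nil => intro _ acc; simp
  | cons tok toks ih =>
    intro h acc
    simp only [List.foldl_cons, Option.bind_some]
    rw [if_pos (by rw [pv_tokenOk_eq]; exact h tok List.mem_cons_self)]
    rw [ih (fun x hx => h x (List.mem_cons_of_mem tok hx))]
    simp

-- ===== VERDICT (by name: the statement is the Claim_ definition above) =====
theorem get_command_list_spec : Claim_equal_get_command_list := by
  intro code _ hpre
  obtain ⟨h1, h2⟩ := hpre
  unfold Spec_get_command_list get_command_list get_command_list_alt
  have hdec : ∀ tok ∈ PySem.Chars.split₀ code.toList, decomp tok = true := by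
    intro tok htok
    exact List.all_eq_true.1 h2 tok htok
  rw [pv_foldA _ hdec [], pv_foldB _ hdec []]
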